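-- pv_equiv track=rewrite | github.com/pypi-data/pypi-mirror-41 | packages/markdown-full-yaml-metadata/markdown-full-yaml-metadata-0.0.4.tar.gz/markdown-full-yaml-metadata-0.0.4/full_yaml_metadata.py | split_by_meta_and_content
-- ===== SOURCE A (Python) =====
-- import typing
--
-- def split_by_meta_and_content(lines: list) -> typing.Tuple[list]:
--     meta_lines = []
--     if lines[0] != '---':
--         return meta_lines, lines
--
--     lines.pop(0)
--     for line in lines:  # type: str
--         if line in ('---', '...'):
--             content_starts_at = lines.index(line) + 1
--             lines = lines[content_starts_at:]
--             break
--
--         meta_lines.append(line)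
--
--     return meta_lines, lines
-- ===== SOURCE B (Python) =====
-- def split_by_meta_and_content(lines: list):
--     if not lines or lines[0] != '---':
--         return [], lines
--     rest = lines[1:]
--     hits = [i for i, line in enumerate(rest) if line in ('---', '...')]
--     if hits:
--         i = hits[0]
--         return rest[:i], rest[i + 1:]
--     return rest, rest
-- ===== Notes on version B (the rewrite author's own statement) =====
-- stated objective: simpler
-- what changed: B is two staged passes -- a comprehension collecting all delimiter positions, then a head-then-slice -- replacing A's append-per-line accumulator loop with a break and a redundant lines.index re-scan; B also does not mutate the caller's list (A pops its first element).
import Mathlib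
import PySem

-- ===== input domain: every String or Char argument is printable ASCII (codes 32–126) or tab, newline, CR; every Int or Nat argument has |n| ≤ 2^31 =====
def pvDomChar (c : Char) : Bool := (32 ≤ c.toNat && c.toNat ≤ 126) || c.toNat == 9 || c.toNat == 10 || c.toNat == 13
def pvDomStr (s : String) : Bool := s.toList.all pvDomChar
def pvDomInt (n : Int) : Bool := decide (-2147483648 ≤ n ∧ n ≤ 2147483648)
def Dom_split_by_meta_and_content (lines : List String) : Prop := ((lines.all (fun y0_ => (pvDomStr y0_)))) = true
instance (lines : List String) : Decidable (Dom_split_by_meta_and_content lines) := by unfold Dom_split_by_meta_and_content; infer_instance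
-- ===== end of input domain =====

-- B replaces A's single append-accumulator loop (with a break and a redundant
-- lines.index re-scan) by two staged passes: a comprehension collecting all delimiter
-- positions, then head-then-slice. B does not mutate the caller's list (A pops its first
-- element); the equivalence proved here is about the return value only.

-- ===== PORT A =====
-- A's for-loop over the popped list: acc accumulates non-delimiter lines; on the first
-- delimiter, content starts after lines.index(line) in the popped list `orig`.
def pvALoop (orig : List String) (todo : List String) (acc : List String) :
    List String × List String :=
  match todo with
  | [] => (acc, orig)
  | line :: t =>
    if line = "---" ∨ line = "..." then
      match PySem.List.index? orig line with
      | some i => (acc, PySem.List.slice orig (some ((i : Int) + 1)) none)  -- lines[content_starts_at:]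
      | none => (acc, orig)  -- unreachable: line ∈ orig
    else
      pvALoop orig t (acc ++ [line])

def split_by_meta_and_content (lines : List String) : List String × List String :=
  match PySem.List.pyGet? lines 0 with
  | none => ([], lines)  -- lines[0] raises IndexError in Python; excluded by Pre_
  | some l0 =>
    if l0 ≠ "---" then ([], lines)
    else
      let rest := lines.drop 1  -- lines.pop(0)
      pvALoop rest rest []

-- ===== PORT B =====
-- `hits = [i for i, line in enumerate(rest) if line in ('---', '...')]`, then slices.
def split_by_meta_and_content_alt (lines : List String) : List String × List String :=
  if lines = [] ∨ lines.head? ≠ some "---" then ([], lines)  -- `if not lines or lines[0] != '---'`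
  else
    let rest := PySem.List.slice lines (some 1) none  -- lines[1:]
    let hits := ((PySem.List.enumerate rest).filter
      (fun p => p.2 == "---" || p.2 == "...")).map (·.1)
    match hits with
    | i :: _ => (PySem.List.slice rest none (some i), PySem.List.slice rest (some (i + 1)) none)
    | [] => (rest, rest)

-- ===== PRECONDITION & SPEC =====
-- A raises IndexError on the empty list (lines[0]); that is the only input excluded.
def Pre_split_by_meta_and_content (lines : List String) : Prop := lines ≠ []
instance (lines : List String) : Decidable (Pre_split_by_meta_and_content lines) := by
  unfold Pre_split_by_meta_and_content; infer_instance

def pvWitness_split_by_meta_and_content : List String := ["---", "a: 1", "---", "body"]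

def Spec_split_by_meta_and_content (lines : List String) (out : List String × List String) : Prop :=
  out = split_by_meta_and_content_alt lines
instance (lines : List String) (out : List String × List String) :
    Decidable (Spec_split_by_meta_and_content lines out) := by
  unfold Spec_split_by_meta_and_content; infer_instance

-- ===== CLAIM (what is proved, stated in full; the proofs are below) =====
def Claim_equal_split_by_meta_and_content : Prop :=
  ∀ (lines : List String), Dom_split_by_meta_and_content lines →
    Pre_split_by_meta_and_content lines →
    Spec_split_by_meta_and_content lines (split_by_meta_and_content lines)

-- ===== LEMMAS AND PROOFS =====

-- Invariant: the processed prefix `pre` contains no delimiter, so A's loop and B's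
-- filtered enumeration (started at offset pre.length) agree on the rest.
theorem pvLoop_agree (todo pre : List String)
    (hpre : ∀ x ∈ pre, ¬(x = "---" ∨ x = "...")) :
    pvALoop (pre ++ todo) todo pre =
      (match ((PySem.List.enumerate todo (pre.length : Int)).filter
          (fun p => p.2 == "---" || p.2 == "...")).map (·.1) with
        | i :: _ => (PySem.List.slice (pre ++ todo) none (some i),
                     PySem.List.slice (pre ++ todo) (some (i + 1)) none)
        | [] => (pre ++ todo, pre ++ todo)) := by
  induction todo generalizing pre with
  | nil => simp [pvALoop, PySem.List.enumerate]
  | cons line t ih =>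
    by_cases hd : line = "---" ∨ line = "..."
    · have hdb : (line == "---" || line == "...") = true := by
        rcases hd with h | h <;> simp [h]
      have hnot : line ∉ pre := fun hmem => hpre line hmem hd
      have hidx : PySem.List.index? (pre ++ line :: t) line = some pre.length := by
        have := PySem.List.index?_append_singleton_self (l := pre) (c := line) hnot
        rw [show pre ++ line :: t = (pre ++ [line]) ++ t by simp]
        rw [PySem.List.index?_append_of_mem _ (by simp), this]
      simp only [pvALoop, if_pos hd, hidx, PySem.List.enumerate_cons, List.filter_cons,
        hdb, if_true, List.map_cons]
      have hslice : PySem.List.slice (pre ++ line :: t) (some ((pre.length : Int) + 1)) none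
          = t := by
        have : ((pre.length : Int) + 1) = ((pre.length + 1 : Nat) : Int) := by push_cast; ring
        rw [this, PySem.List.slice_from_natCast]
        simp
      rw [hslice]
      have h1 : PySem.List.slice (pre ++ line :: t) none (some ((pre.length : Int))) = pre := by
        rw [PySem.List.slice_to_natCast, List.take_append_of_le_length (le_refl _),
          List.take_length]
      rw [h1]
    · have hdb : (line == "---" || line == "...") = false := by
        simp only [Bool.or_eq_false_iff, beq_eq_false_iff_ne, ne_eq]
        exact ⟨fun h => hd (Or.inl h), fun h => hd (Or.inr h)⟩
      have step : pvALoop (pre ++ line :: t) (line :: t) pre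
          = pvALoop (pre ++ line :: t) t (pre ++ [line]) := by
        simp [pvALoop, hd]
      have hpre' : ∀ x ∈ pre ++ [line], ¬(x = "---" ∨ x = "...") := by
        intro x hx
        rcases List.mem_append.mp hx with h | h
        · exact hpre x h
        · simp at h; subst h; exact hd
      have hih := ih (pre ++ [line]) hpre'
      rw [step, show pre ++ line :: t = (pre ++ [line]) ++ t by simp, hih]
      simp [PySem.List.enumerate_cons, hdb]

-- ===== VERDICT (by name: the statement is the Claim_ definition above) =====
theorem split_by_meta_and_content_spec : Claim_equal_split_by_meta_and_content := by
  intro lines _ hpre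
  unfold Spec_split_by_meta_and_content
  match lines with
  | [] => exact absurd rfl hpre
  | l0 :: rest =>
    simp only [split_by_meta_and_content, split_by_meta_and_content_alt,
      PySem.List.pyGet?]
    by_cases h0 : l0 = "---"
    · subst h0
      simp only [PySem.List.pyIdx?]
      norm_num [PySem.List.slice_from_one]
      have := pvLoop_agree rest [] (by simp)
      simpa using this
    · simp [PySem.List.pyIdx?, h0]
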